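-- pv_equiv track=rewrite | github.com/jorislimonier/uca-msc-dsai | semester1/python-data-manipulation/assignment01/assignment1_correction.py | filterAndSquarePrime
-- ===== SOURCE A (Python) =====
-- def square(x):
--     return x*x
--
-- def filterAndSquarePrime(arr):
--
--     # a very simple function to check a number is prime or not
--     def checkPrime(number):
--         if (number <= 1): return False
--         # if we find any divisor of "number" return false
--         # we can improve this process by only finding divisors in range [2, sqrt(number)]
--         for i in range(2, int(number/2) + 1):
--             if number % i == 0:
--                 return False
--         return True
--
--     primeNumbers = filter(lambda x: checkPrime(x), arr)
--     return map(lambda x: square(x), primeNumbers)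
-- ===== SOURCE B (Python) =====
-- def filterAndSquarePrime(arr):
--     def isPrime(n):
--         if n <= 1:
--             return False
--         i = 2
--         while i * i <= n:
--             if n % i == 0:
--                 return False
--             i += 1
--         return True
--     return [x * x for x in arr if isPrime(x)]
-- ===== Notes on version B (the rewrite author's own statement) =====
-- stated objective: faster
-- what changed: Primality is tested by trial division only up to sqrt(n) in a while loop (instead of scanning every candidate divisor up to n/2), and the filter+map pipeline becomes a single list comprehension.
import Mathlib
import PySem

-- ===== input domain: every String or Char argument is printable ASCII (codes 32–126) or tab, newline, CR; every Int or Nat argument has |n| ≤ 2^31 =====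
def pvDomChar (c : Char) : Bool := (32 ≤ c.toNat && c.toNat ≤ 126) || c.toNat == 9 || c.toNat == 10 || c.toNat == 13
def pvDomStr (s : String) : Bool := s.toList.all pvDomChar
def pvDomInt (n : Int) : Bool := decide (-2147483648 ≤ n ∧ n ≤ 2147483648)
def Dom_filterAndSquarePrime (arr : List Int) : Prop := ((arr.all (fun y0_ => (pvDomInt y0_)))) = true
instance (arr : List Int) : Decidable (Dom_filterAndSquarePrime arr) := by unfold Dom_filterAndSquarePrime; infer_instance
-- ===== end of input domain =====

-- B replaces A's trial division over all candidates up to n/2 by trial division only up to sqrt(n),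
-- and fuses the filter+map pipeline into one comprehension pass.

-- ===== PORT A =====
-- the `for i in range(2, int(number/2)+1)` loop with its early `return False`,
-- as a counting recursion over the range's index (the range list itself is never materialized)
def pvLoopA (n i stop : Int) : Bool :=
  if _h : i < stop then
    if PySem.Int.mod n i == 0 then false else pvLoopA n (i + 1) stop
  else true
termination_by (stop - i).toNat

-- int(number/2): for 2 ≤ number ≤ 2^31 the float division number/2 is exact (a half-integer),
-- so int() truncation equals floor division by 2; ported as PySem.Int.floordiv n 2 (only reached for n ≥ 2).
def pvCheckPrimeA (n : Int) : Bool :=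
  if n ≤ 1 then false
  else pvLoopA n 2 (PySem.Int.floordiv n 2 + 1)

def pvSquare (x : Int) : Int := x * x

def filterAndSquarePrime (arr : List Int) : List Int :=
  (arr.filter (fun x => pvCheckPrimeA x)).map (fun x => pvSquare x)

-- ===== PORT B =====
-- `while i * i <= n` loop of Source B's isPrime
def pvLoopB (n i : Int) : Bool :=
  if h : i * i ≤ n then
    if PySem.Int.mod n i == 0 then false else pvLoopB n (i + 1)
  else true
termination_by (n + 1 - i).toNat
decreasing_by
  by_cases hi : 1 ≤ i
  · have : i ≤ i * i := le_mul_of_one_le_left (by omega) hi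
    omega
  · have : (0:Int) ≤ i * i := mul_self_nonneg i
    omega

def pvIsPrimeB (n : Int) : Bool := if n ≤ 1 then false else pvLoopB n 2

def filterAndSquarePrime_alt (arr : List Int) : List Int :=
  arr.filterMap (fun x => if pvIsPrimeB x then some (x * x) else none)

-- ===== PRECONDITION & SPEC =====
def Spec_filterAndSquarePrime (arr : List Int) (out : List Int) : Prop := out = filterAndSquarePrime_alt arr
instance (arr : List Int) (out : List Int) : Decidable (Spec_filterAndSquarePrime arr out) := by unfold Spec_filterAndSquarePrime; infer_instance

-- ===== CLAIM (what is proved, stated in full; the proofs are below) =====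
def Claim_equal_filterAndSquarePrime : Prop := ∀ (arr : List Int), Dom_filterAndSquarePrime arr → Spec_filterAndSquarePrime arr (filterAndSquarePrime arr)

-- ===== LEMMAS AND PROOFS =====

theorem pvLoopA_iff (n i stop : Int) :
    pvLoopA n i stop = true ↔ ∀ j, i ≤ j → j < stop → ¬ PySem.Int.mod n j = 0 := by
  induction i using pvLoopA.induct n stop with
  | case1 i h hm =>
    have hm0 : PySem.Int.mod n i = 0 := by simpa using hm
    rw [pvLoopA, dif_pos h, if_pos hm]
    constructor
    · intro hc; simp at hc
    · intro H; exact absurd hm0 (H i le_rfl h)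
  | case2 i h hm ih =>
    have hm0 : ¬ PySem.Int.mod n i = 0 := by simpa using hm
    rw [pvLoopA, dif_pos h, if_neg hm, ih]
    constructor
    · intro H j hj hjstop
      rcases eq_or_lt_of_le hj with rfl | hj'
      · exact hm0
      · exact H j (by omega) hjstop
    · intro H j hj hjstop; exact H j (by omega) hjstop
  | case3 i h =>
    rw [pvLoopA, dif_neg h]
    constructor
    · intro _ j hj hjstop; omega
    · intro _; rfl

theorem pvLoopB_iff (n i : Int) :
    0 ≤ i → (pvLoopB n i = true ↔ ∀ j, i ≤ j → j * j ≤ n → ¬ PySem.Int.mod n j = 0) := by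
  induction i using pvLoopB.induct n with
  | case1 i h hm =>
    intro _
    have hm0 : PySem.Int.mod n i = 0 := by simpa using hm
    rw [pvLoopB, dif_pos h, if_pos hm]
    constructor
    · intro hc; simp at hc
    · intro H; exact absurd hm0 (H i le_rfl h)
  | case2 i h hm ih =>
    intro hi
    have hm0 : ¬ PySem.Int.mod n i = 0 := by simpa using hm
    rw [pvLoopB, dif_pos h, if_neg hm, ih (by omega)]
    constructor
    · intro H j hj hjj
      rcases eq_or_lt_of_le hj with rfl | hj'
      · exact hm0
      · exact H j (by omega) hjj
    · intro H j hj hjj; exact H j (by omega) hjj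
  | case3 i h =>
    intro hi
    rw [pvLoopB, dif_neg h]
    constructor
    · intro _ j hj hjj hmod
      have : i * i ≤ j * j := mul_le_mul hj hj hi (by omega)
      omega
    · intro _; rfl

-- core arithmetic fact: for n ≥ 2, "no divisor in [2, n//2]" ↔ "no divisor d with d² ≤ n"
theorem pv_div_bound (n : Int) (hn : 2 ≤ n) :
    (∀ d, 2 ≤ d → d * 2 ≤ n → ¬ d ∣ n) ↔ (∀ d, 2 ≤ d → d * d ≤ n → ¬ d ∣ n) := by
  constructor
  · intro H d hd hdd hdvd
    exact H d hd (le_trans (by nlinarith) hdd) hdvd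
  · intro H d hd hd2 hdvd
    obtain ⟨e, he⟩ := hdvd
    have he2 : 2 ≤ e := by nlinarith
    by_cases hdd : d * d ≤ n
    · exact H d hd hdd ⟨e, he⟩
    · have hed : e < d := by nlinarith
      have : e * e ≤ n := by nlinarith
      exact H e he2 this ⟨d, by linarith [he, mul_comm d e]⟩

theorem pvCheck_eq (n : Int) : pvCheckPrimeA n = pvIsPrimeB n := by
  unfold pvCheckPrimeA pvIsPrimeB
  by_cases hn : n ≤ 1
  · simp [hn]
  · simp only [hn, if_false]
    have hn2 : 2 ≤ n := by omega
    rw [Bool.eq_iff_iff, pvLoopA_iff, pvLoopB_iff n 2 (by omega)]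
    have hfd : ∀ d : Int, (d ≤ PySem.Int.floordiv n 2 ↔ d * 2 ≤ n) := fun d =>
      PySem.Int.le_floordiv_iff_mul_le (by omega)
    constructor
    · intro H j hj hjj hmod
      refine (pv_div_bound n hn2).mp (fun d hd hd2 hdvd => ?_) j hj hjj
        ((PySem.Int.mod_eq_zero_iff_dvd n j).mp hmod)
      exact H d hd (by have := (hfd d).mpr hd2; omega)
        ((PySem.Int.mod_eq_zero_iff_dvd n d).mpr hdvd)
    · intro H i hi histop hmod
      have hdvd := (PySem.Int.mod_eq_zero_iff_dvd n i).mp hmod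
      have h2 : i * 2 ≤ n := (hfd i).mp (by omega)
      exact (pv_div_bound n hn2).mpr
        (fun d hd hdd hdvd' => H d hd hdd ((PySem.Int.mod_eq_zero_iff_dvd n d).mpr hdvd'))
        i hi h2 hdvd

theorem pv_filter_filterMap (p : Int → Bool) (f : Int → Int) (arr : List Int) :
    (arr.filter p).map f = arr.filterMap (fun x => if p x then some (f x) else none) := by
  induction arr with
  | nil => rfl
  | cons x xs ih =>
    by_cases h : p x <;> simp [h, ih]

-- ===== VERDICT (by name: the statement is the Claim_ definition above) =====
theorem filterAndSquarePrime_spec : Claim_equal_filterAndSquarePrime := by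
  intro arr _
  unfold Spec_filterAndSquarePrime filterAndSquarePrime filterAndSquarePrime_alt
  have : (fun x => pvCheckPrimeA x) = (fun x => pvIsPrimeB x) := funext pvCheck_eq
  rw [this]
  exact pv_filter_filterMap pvIsPrimeB (fun x => x * x) arr
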